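-- pv_equiv track=rewrite | github.com/sp863/algorithm_python | programmers/lvl_0/63_2차원으로만들기.py | solution
-- ===== SOURCE A (Python) =====
-- def solution(num_list, n):
--     answer = []
--     tempArr = []
--     for num in num_list:
--         tempArr.append(num)
--         if (len(tempArr) == n):
--             answer.append(tempArr)
--             tempArr = []
--
--     return answer
-- ===== SOURCE B (Python) =====
-- def solution(num_list, n):
--     if n <= 0:
--         return []
--     m = len(num_list) // n * n
--     return [num_list[i:i + n] for i in range(0, m, n)]
-- ===== Notes on version B (the rewrite author's own statement) =====
-- stated objective: idiomatic
-- what changed: Replaces the element-by-element accumulation into a temporary buffer with direct slicing at chunk-start offsets (a comprehension over range(0, len//n*n, n)), guarding n<=0 up front.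
import Mathlib
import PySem

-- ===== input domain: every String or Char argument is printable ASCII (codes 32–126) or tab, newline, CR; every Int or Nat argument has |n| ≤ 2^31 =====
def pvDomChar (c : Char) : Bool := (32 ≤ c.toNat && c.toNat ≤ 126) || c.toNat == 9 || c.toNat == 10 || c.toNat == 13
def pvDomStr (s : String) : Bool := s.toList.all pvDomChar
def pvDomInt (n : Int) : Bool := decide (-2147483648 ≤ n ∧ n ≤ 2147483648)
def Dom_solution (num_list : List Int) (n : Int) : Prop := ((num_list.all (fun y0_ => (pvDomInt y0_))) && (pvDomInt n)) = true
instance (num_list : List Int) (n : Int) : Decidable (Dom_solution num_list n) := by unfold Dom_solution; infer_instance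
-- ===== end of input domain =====

-- B chunks by slicing at chunk-start offsets instead of A's element-by-element buffer accumulation; same cost, more idiomatic.

-- ===== PORT A =====
-- A's loop body: append num to tempArr, emit it when its length reaches n.
def stepA (n : Int) (st : List (List Int) × List Int) (num : Int) : List (List Int) × List Int :=
  let tempArr := st.2 ++ [num]
  if ((tempArr.length : Int) == n) then (st.1 ++ [tempArr], ([] : List Int))
  else (st.1, tempArr)

def solution (num_list : List Int) (n : Int) : List (List Int) :=
  (num_list.foldl (stepA n) (([] : List (List Int)), ([] : List Int))).1

-- ===== PORT B =====
def solution_alt (num_list : List Int) (n : Int) : List (List Int) :=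
  if n ≤ 0 then []
  else
    let m := PySem.Int.floordiv (num_list.length : Int) n * n
    (PySem.List.pyRange 0 m n).map (fun i => PySem.List.slice num_list (some i) (some (i + n)))

-- ===== PRECONDITION & SPEC =====
def Spec_solution (num_list : List Int) (n : Int) (out : List (List Int)) : Prop := out = solution_alt num_list n
instance (num_list : List Int) (n : Int) (out : List (List Int)) : Decidable (Spec_solution num_list n out) := by unfold Spec_solution; infer_instance

-- ===== CLAIM (what is proved, stated in full; the proofs are below) =====
def Claim_equal_solution : Prop := ∀ (num_list : List Int) (n : Int), Dom_solution num_list n → Spec_solution num_list n (solution num_list n)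

-- ===== LEMMAS AND PROOFS =====

-- A's loop as structural recursion on the input list (proof intermediary).
def chunkA (k : Nat) : List Int → List Int → List (List Int)
  | _, [] => []
  | tmp, x :: xs =>
    if tmp.length + 1 = k then (tmp ++ [x]) :: chunkA k [] xs
    else chunkA k (tmp ++ [x]) xs

theorem foldA_eq_chunkA (k : Nat) (l : List Int) :
    ∀ (ans : List (List Int)) (tmp : List Int),
      (l.foldl (stepA (k : Int)) (ans, tmp)).1 = ans ++ chunkA k tmp l := by
  induction l with
  | nil => intro ans tmp; simp [chunkA]
  | cons x xs ih =>
    intro ans tmp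
    rw [List.foldl_cons]
    by_cases h : tmp.length + 1 = k
    · have hs : stepA (k : Int) (ans, tmp) x = (ans ++ [tmp ++ [x]], ([] : List Int)) := by
        simp [stepA, h]
      rw [hs, ih]
      simp only [chunkA, if_pos h]
      simp
    · have hs : stepA (k : Int) (ans, tmp) x = (ans, tmp ++ [x]) := by
        simp only [stepA, List.length_append, List.length_singleton, beq_iff_eq]
        rw [if_neg (by exact_mod_cast h)]
      rw [hs, ih]
      simp only [chunkA, if_neg h]

theorem foldA_nonpos (n : Int) (hn : n ≤ 0) (l : List Int) :
    ∀ (ans : List (List Int)) (tmp : List Int),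
      (l.foldl (stepA n) (ans, tmp)).1 = ans := by
  induction l with
  | nil => intro ans tmp; rfl
  | cons x xs ih =>
    intro ans tmp
    rw [List.foldl_cons]
    have hs : stepA n (ans, tmp) x = (ans, tmp ++ [x]) := by
      simp only [stepA, List.length_append, List.length_singleton, beq_iff_eq]
      rw [if_neg (by push_cast; omega)]
    rw [hs, ih]

theorem chunkA_nil_of_short (k : Nat) (l : List Int) :
    ∀ tmp : List Int, tmp.length + l.length < k → chunkA k tmp l = [] := by
  induction l with
  | nil => intro tmp _; rfl
  | cons x xs ih =>
    intro tmp h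
    simp only [List.length_cons] at h
    simp only [chunkA]
    rw [if_neg (by omega)]
    exact ih (tmp ++ [x]) (by simp; omega)

theorem chunkA_emit (k : Nat) (ys : List Int) :
    ∀ (tmp rest : List Int), tmp.length < k → tmp.length + ys.length = k →
      chunkA k tmp (ys ++ rest) = (tmp ++ ys) :: chunkA k [] rest := by
  induction ys with
  | nil => intro tmp rest h1 h2; simp at h2; omega
  | cons y ys ih =>
    intro tmp rest h1 h2
    simp only [List.length_cons] at h2
    by_cases h : tmp.length + 1 = k
    · have hys : ys = [] := by
        cases ys with
        | nil => rfl
        | cons a b => simp at h2; omega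
      subst hys
      simp only [List.cons_append, List.nil_append, chunkA, if_pos h]
    · simp only [List.cons_append, chunkA, if_neg h]
      rw [ih (tmp ++ [y]) rest (by simp; omega) (by simp; omega)]
      simp

theorem chunkA_eq_map (k : Nat) (hk : 0 < k) (l : List Int) :
    chunkA k [] l = (List.range (l.length / k)).map (fun j => (l.drop (k * j)).take k) := by
  by_cases h : l.length < k
  · rw [chunkA_nil_of_short k l [] (by simpa using h)]
    rw [Nat.div_eq_of_lt h]
    simp
  · rw [not_lt] at h
    have hlen : ([] : List Int).length + (l.take k).length = k := by
      simp [List.length_take]; omega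
    calc chunkA k [] l
        = chunkA k [] (l.take k ++ l.drop k) := by rw [List.take_append_drop]
      _ = ([] ++ l.take k) :: chunkA k [] (l.drop k) :=
          chunkA_emit k (l.take k) [] (l.drop k) (by simpa using hk) hlen
      _ = l.take k :: (List.range ((l.drop k).length / k)).map
            (fun j => ((l.drop k).drop (k * j)).take k) := by
          rw [chunkA_eq_map k hk (l.drop k)]; simp
      _ = (List.range (l.length / k)).map (fun j => (l.drop (k * j)).take k) := by
          have hq : l.length / k = (l.drop k).length / k + 1 := by
            rw [List.length_drop]
            exact Nat.div_eq_sub_div hk h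
          rw [hq, List.range_succ_eq_map, List.map_cons, List.map_map]
          refine congrArg₂ List.cons (by simp) (List.map_congr_left ?_)
          intro j _
          simp only [Function.comp_apply, List.drop_drop]
          congr 2
          rw [Nat.succ_eq_add_one, Nat.mul_add, Nat.mul_one]
          omega
termination_by l.length
decreasing_by
  rw [List.length_drop]; omega

theorem alt_eq_map (k : Nat) (hk : 0 < k) (l : List Int) :
    solution_alt l (k : Int) = (List.range (l.length / k)).map (fun j => (l.drop (k * j)).take k) := by
  have hkz : (k : Int) ≠ 0 := by exact_mod_cast hk.ne'
  have hkpos : (0 : Int) < (k : Int) := by exact_mod_cast hk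
  have hnp : ¬ ((k : Int) ≤ 0) := by omega
  simp only [solution_alt, if_neg hnp]
  have hm : PySem.Int.floordiv (l.length : Int) (k : Int) * (k : Int)
      = (((l.length / k) * k : Nat) : Int) := by
    rw [PySem.Int.floordiv_natCast l.length k]; push_cast; ring
  rw [hm]
  set q := l.length / k with hq
  rw [PySem.List.pyRange_of_pos 0 ((q * k : Nat) : Int) hkpos]
  have hcount : (if (0 : Int) < ((q * k : Nat) : Int)
      then ((((q * k : Nat) : Int) - 0 + (k : Int) - 1) / (k : Int)).toNat else 0) = q := by
    by_cases hq0 : q = 0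
    · simp [hq0]
    · have hpos : (0 : Int) < ((q * k : Nat) : Int) := by
        exact_mod_cast Nat.mul_pos (Nat.pos_of_ne_zero hq0) hk
      rw [if_pos hpos]
      have hrw : (((q * k : Nat) : Int) - 0 + (k : Int) - 1)
          = ((k : Int) - 1) + (q : Int) * (k : Int) := by push_cast; ring
      rw [hrw, Int.add_mul_ediv_right _ _ hkz,
          Int.ediv_eq_zero_of_lt (by omega) (by omega)]
      simp
  rw [hcount, List.map_map]
  apply List.map_congr_left
  intro j _
  simp only [Function.comp_apply]
  have h1 : (0 : Int) + (k : Int) * (j : Int) = ((k * j : Nat) : Int) := by push_cast; ring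
  rw [h1]
  have h2 : ((k * j : Nat) : Int) + (k : Int) = ((k * j : Nat) : Int) + ((k : Nat) : Int) := by norm_cast
  rw [h2, PySem.List.slice_natCast_add]

-- ===== VERDICT (by name: the statement is the Claim_ definition above) =====
theorem solution_spec : Claim_equal_solution := by
  intro num_list n _
  unfold Spec_solution solution
  by_cases hn : n ≤ 0
  · rw [foldA_nonpos n hn num_list [] []]
    simp [solution_alt, hn]
  · rw [not_le] at hn
    obtain ⟨k, hk⟩ : ∃ k : Nat, n = (k : Int) := ⟨n.toNat, by omega⟩
    subst hk
    have hkpos : 0 < k := by exact_mod_cast hn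
    rw [foldA_eq_chunkA k num_list [] []]
    rw [List.nil_append, chunkA_eq_map k hkpos, alt_eq_map k hkpos]
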